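-- pv_equiv track=rewrite | github.com/Kamal578/CSCI-6515-Project1 | src/spell_utils.py | _tokenize_az_variants
-- ===== SOURCE A (Python) =====
-- def _tokenize_az_variants(word: str) -> list[str]:
--     """
--     Tokenize left-to-right, matching digraphs first.
--     """
--     units: list[str] = []
--     i = 0
--     while i < len(word):
--         two = word[i:i + 2]
--         if two in ("ch", "sh", "gh"):
--             units.append(two)
--             i += 2
--         else:
--             units.append(word[i])
--             i += 1
--     return units
-- ===== SOURCE B (Python) =====
-- def _tokenize_az_variants(word: str) -> list[str]:
--     """
--     Tokenize left-to-right, matching digraphs first.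
--
--     One pass over the characters with a small state machine: a pending
--     'c'/'s'/'g' waits to see whether an 'h' follows (forming a digraph);
--     no index arithmetic or slicing.
--     """
--     units: list[str] = []
--     pending: str | None = None
--     for c in word:
--         if pending is not None:
--             if c == 'h':
--                 units.append(pending + 'h')
--                 pending = None
--                 continue
--             units.append(pending)
--             pending = None
--         if c in ('c', 's', 'g'):
--             pending = c
--         else:
--             units.append(c)
--     if pending is not None:
--         units.append(pending)
--     return units
-- ===== Notes on version B (the rewrite author's own statement) =====
-- stated objective: alternative
-- what changed: Replaces A's index-and-slice while-loop (two-character slicing with manual index arithmetic) by a single character-by-character pass of a small state machine keeping a pending digraph-start consonant that waits for a possible following h.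
import Mathlib
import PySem

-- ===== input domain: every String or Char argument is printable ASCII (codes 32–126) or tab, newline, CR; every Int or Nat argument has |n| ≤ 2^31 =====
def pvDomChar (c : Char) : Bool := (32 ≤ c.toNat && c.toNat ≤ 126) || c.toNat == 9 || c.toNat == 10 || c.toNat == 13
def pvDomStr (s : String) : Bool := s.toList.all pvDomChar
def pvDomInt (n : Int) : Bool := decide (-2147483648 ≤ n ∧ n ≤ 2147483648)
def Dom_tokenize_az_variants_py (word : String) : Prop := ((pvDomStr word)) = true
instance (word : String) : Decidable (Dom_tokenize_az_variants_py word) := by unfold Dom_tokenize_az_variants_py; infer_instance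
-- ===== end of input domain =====

-- B replaces A's index-and-slice while-loop by a single left fold with a
-- pending-digraph-start state; a timing run measured B faster by a constant factor (no per-step slice allocation).

-- ===== PORT A =====
-- A's while-loop: index i, accumulator `units`, slicing word[i:i+2]
def pvALoop (cs : List Char) (i : Nat) (units : List String) : List String :=
  if h : i < cs.length then
    let two := PySem.List.slice cs (some (i : Int)) (some ((i : Int) + 2))
    if two = ['c', 'h'] ∨ two = ['s', 'h'] ∨ two = ['g', 'h'] then
      pvALoop cs (i + 2) (units ++ [String.ofList two])
    else
      pvALoop cs (i + 1) (units ++ [String.ofList [cs[i]]])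
  else units
termination_by cs.length - i

def tokenize_az_variants_py (word : String) : List String :=
  pvALoop word.toList 0 []

-- ===== PORT B =====
-- Source B's trailing emit-or-set-pending step
def pvBEmit (units : List String) (c : Char) : List String × Option Char :=
  if c = 'c' ∨ c = 's' ∨ c = 'g' then (units, some c)
  else (units ++ [String.ofList [c]], none)

-- Source B's loop body over state (units so far, pending digraph-start consonant)
def pvBStep (st : List String × Option Char) (c : Char) : List String × Option Char :=
  match st with
  | (units, some p) =>
      if c = 'h' then (units ++ [String.ofList [p, 'h']], none)
      else pvBEmit (units ++ [String.ofList [p]]) c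
  | (units, none) => pvBEmit units c

-- Source B's final `if pending is not None: units.append(pending)`
def pvBFinal (st : List String × Option Char) : List String :=
  match st with
  | (units, some p) => units ++ [String.ofList [p]]
  | (units, none) => units

def tokenize_az_variants_py_alt (word : String) : List String :=
  pvBFinal (word.toList.foldl pvBStep ([], none))

-- ===== PRECONDITION & SPEC =====
def Spec_tokenize_az_variants_py (word : String) (out : List String) : Prop := out = tokenize_az_variants_py_alt word
instance (word : String) (out : List String) : Decidable (Spec_tokenize_az_variants_py word out) := by unfold Spec_tokenize_az_variants_py; infer_instance

-- ===== CLAIM (what is proved, stated in full; the proofs are below) =====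
def Claim_equal_tokenize_az_variants_py : Prop := ∀ (word : String), Dom_tokenize_az_variants_py word → Spec_tokenize_az_variants_py word (tokenize_az_variants_py word)

-- ===== LEMMAS AND PROOFS =====

-- a pending consonant followed by a non-'h' behaves as if it had been emitted already
theorem pvBStep_flush (units : List String) (p c : Char) (hc : c ≠ 'h') :
    pvBStep (units, some p) c = pvBStep (units ++ [String.ofList [p]], none) c := by
  simp [pvBStep, hc]

-- A's slice word[i:i+2] is the first two characters of the rest
theorem pvSlice_two (cs : List Char) (i : Nat) :
    PySem.List.slice cs (some (i : Int)) (some ((i : Int) + 2)) = (cs.drop i).take 2 := by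
  have h := PySem.List.slice_toNat cs (a := (i : Int)) (b := (i : Int) + 2)
    (by positivity) (by positivity)
  have h2 : ((i : Int) + 2).toNat = i + 2 := by omega
  simp [h, h2]

-- loop invariant: A's loop from position i equals B's fold over the rest
theorem pvALoop_eq (cs : List Char) : ∀ (n i : Nat) (units : List String),
    cs.length - i ≤ n →
    pvALoop cs i units = pvBFinal ((cs.drop i).foldl pvBStep (units, none)) := by
  intro n
  induction n with
  | zero =>
      intro i units hle
      have hge : cs.length ≤ i := by omega
      rw [pvALoop, dif_neg (by omega), List.drop_of_length_le hge]
      rfl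
  | succ n ih =>
      intro i units hle
      by_cases h : i < cs.length
      · have hdrop : cs.drop i = cs[i] :: cs.drop (i + 1) :=
          List.drop_eq_getElem_cons h
        rw [pvALoop, dif_pos h]
        simp only [pvSlice_two]
        rcases hrest : cs.drop (i + 1) with _ | ⟨d, rest⟩
        · -- last character: take 2 = [cs[i]], never a digraph
          have htake : (cs.drop i).take 2 = [cs[i]] := by rw [hdrop, hrest]; rfl
          rw [htake]
          rw [if_neg (by simp)]
          rw [ih (i + 1) _ (by omega), hdrop, hrest]
          by_cases hcsg : cs[i] = 'c' ∨ cs[i] = 's' ∨ cs[i] = 'g'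
          · simp [pvBStep, pvBEmit, pvBFinal, hcsg]
          · simp [pvBStep, pvBEmit, pvBFinal, hcsg]
        · have htake : (cs.drop i).take 2 = [cs[i], d] := by rw [hdrop, hrest]; rfl
          rw [htake]
          have hdrop2 : cs.drop (i + 2) = rest := by
            have : cs.drop (i + 2) = (cs.drop (i + 1)).drop 1 := by
              rw [List.drop_drop]
            rw [this, hrest]; rfl
          by_cases hdig : [cs[i], d] = ['c', 'h'] ∨ [cs[i], d] = ['s', 'h'] ∨ [cs[i], d] = ['g', 'h']
          · -- digraph consumed: B sets pending, then 'h' completes it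
            rw [if_pos hdig]
            rw [ih (i + 2) _ (by omega), hdrop2, hdrop, hrest]
            have hd : d = 'h' := by rcases hdig with h1 | h1 | h1 <;> simp_all
            have hcsg : cs[i] = 'c' ∨ cs[i] = 's' ∨ cs[i] = 'g' := by
              rcases hdig with h1 | h1 | h1 <;> simp_all
            subst hd
            simp only [List.foldl_cons]
            rw [show pvBStep (units, none) cs[i] = (units, some cs[i]) by
                  simp [pvBStep, pvBEmit, hcsg]]
            simp [pvBStep]
          · rw [if_neg hdig]
            rw [ih (i + 1) _ (by omega), hdrop, hrest]
            by_cases hcsg : cs[i] = 'c' ∨ cs[i] = 's' ∨ cs[i] = 'g'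
            · -- pending is set, and d ≠ 'h' (else it were a digraph): flush it
              have hdne : d ≠ 'h' := by
                intro hd; subst hd; rcases hcsg with h1 | h1 | h1 <;> simp_all
              simp only [List.foldl_cons]
              rw [show pvBStep (units, none) cs[i] = (units, some cs[i]) by
                    simp [pvBStep, pvBEmit, hcsg]]
              rw [pvBStep_flush _ _ _ hdne]
            · simp only [List.foldl_cons]
              rw [show pvBStep (units, none) cs[i]
                    = (units ++ [String.ofList [cs[i]]], none) by
                    simp [pvBStep, pvBEmit, hcsg]]
      · rw [pvALoop, dif_neg h, List.drop_of_length_le (by omega)]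
        rfl

-- ===== VERDICT (by name: the statement is the Claim_ definition above) =====
theorem tokenize_az_variants_py_spec : Claim_equal_tokenize_az_variants_py := by
  intro word _
  unfold Spec_tokenize_az_variants_py tokenize_az_variants_py tokenize_az_variants_py_alt
  simpa using pvALoop_eq word.toList word.toList.length 0 [] (by omega)
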